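-- pv_equiv track=rewrite | github.com/OhDasom88/CodingTestPractice | programmers_skill_up/20220314_1_야근.py | solution
-- ===== SOURCE A (Python) =====
-- import heapq
-- import heapq
--
-- def solution(n:int, works:list):
--     works = [-1*w for w in works]
--     while n>0:
--         heapq.heapify(works)
--         temp = []
--         temp.append(heapq.heappop(works))
--         if temp[0]==0:break
--         while len(works)!=0 and len(temp)<n  and temp[0] == works[0] :
--             temp.append(heapq.heappop(works))
--         n -= len(temp)
--         for t in temp:
--             heapq.heappush(works, t+1)
--     if sum(works)<=0:
--         return sum([w**2 for w in works])
--     else: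
--         return 0
-- ===== SOURCE B (Python) =====
-- def solution(n, works):
--     # binary search on the final level instead of simulating unit reductions
--     if not works:
--         return 0
--     S = sum(works)
--     if n > 0:
--         mn, mx = min(works), max(works)
--         lo, hi = mn - n, mx
--         while lo < hi:
--             mid = (lo + hi) // 2
--             if sum(w - mid for w in works if w > mid) <= n:
--                 hi = mid
--             else:
--                 lo = mid + 1
--         L, r = lo, n - sum(w - lo for w in works if w > lo)
--         if L <= 0 and mx >= 0:
--             L, r = 0, 0
--         used = sum(w - L for w in works if w > L) + r
--         sq = (sum(w * w for w in works if w < L)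
--               + (sum(1 for w in works if w >= L) - r) * L * L
--               + r * (L - 1) * (L - 1))
--     else:
--         used = 0
--         sq = sum(w * w for w in works)
--     return sq if S - used >= 0 else 0
-- ===== Notes on version B (the rewrite author's own statement) =====
-- stated objective: faster
-- what changed: Replaces A's heap simulation, which repeatedly pops the current maximum group and lowers it one unit per outer iteration, by a binary search for the final level L (cost(L) <= n < cost(L-1)) followed by closed-form arithmetic for the leftover reductions and the final sum of squares.
import Mathlib
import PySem

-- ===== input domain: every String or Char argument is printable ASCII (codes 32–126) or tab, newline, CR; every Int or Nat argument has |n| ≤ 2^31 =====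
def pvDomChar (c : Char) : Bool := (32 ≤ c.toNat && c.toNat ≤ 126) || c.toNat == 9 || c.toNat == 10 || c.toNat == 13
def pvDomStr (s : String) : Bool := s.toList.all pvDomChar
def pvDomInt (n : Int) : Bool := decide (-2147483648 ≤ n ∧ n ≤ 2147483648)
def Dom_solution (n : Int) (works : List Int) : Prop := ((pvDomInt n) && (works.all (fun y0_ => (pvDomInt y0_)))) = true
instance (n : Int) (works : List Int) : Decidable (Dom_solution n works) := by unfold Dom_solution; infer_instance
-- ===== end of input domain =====

-- B replaces A's unit-step heap simulation by a binary search for the final level plus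
-- closed-form arithmetic (objective: faster).
-- A's heap is modelled by a sorted list (heapify = sort, heappop = take the head, heappush =
-- append, re-sorted at the next heapify): exact for every value A observes — pop results and
-- root comparisons depend only on the multiset, as do the final sum and sum of squares.

-- ===== PORT A =====
-- inner 'while len(works)!=0 and len(temp)<n and temp[0]==works[0]' pop loop
def pvInner (ws : List Int) (temp : List Int) (n t0 : Int) : List Int × List Int :=
  match ws with
  | [] => (temp, [])
  | w :: rest =>
    if (temp.length : Int) < n ∧ t0 = w then pvInner rest (temp ++ [w]) n t0
    else (temp, w :: rest)

-- outer 'while n>0' loop; fuel n.toNat suffices since each iteration decreases n by ≥ 1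
def pvLoop : Nat → Int → List Int → List Int
  | 0, _, ws => ws
  | fuel+1, n, ws =>
    if 0 < n then
      match PySem.List.sorted ws (fun x => x) false with
      | [] => []          -- heappop from an empty heap raises IndexError; excluded by Pre_
      | t0 :: rest =>
        if t0 = 0 then rest
        else
          let tr := pvInner rest [t0] n t0
          pvLoop fuel (n - tr.1.length) (tr.2 ++ tr.1.map (fun t => t + 1))
    else ws

def solution (n : Int) (works : List Int) : Int :=
  let ws := works.map (fun w => -1 * w)
  let fin := pvLoop n.toNat n ws
  if fin.sum ≤ 0 then (fin.map (fun w => w ^ 2)).sum else 0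

-- ===== PORT B =====
-- sum(w - mid for w in works if w > mid)
def pvCost (works : List Int) (mid : Int) : Int :=
  ((works.filter (fun w => decide (mid < w))).map (fun w => w - mid)).sum

-- 'while lo < hi' bisection; fuel (hi-lo).toNat suffices
def pvBS : Nat → Int → Int → Int → List Int → Int
  | 0, lo, _, _, _ => lo
  | fuel+1, lo, hi, n, works =>
    if lo < hi then
      let mid := PySem.Int.floordiv (lo + hi) 2
      if pvCost works mid ≤ n then pvBS fuel lo mid n works
      else pvBS fuel (mid+1) hi n works
    else lo

def solution_alt (n : Int) (works : List Int) : Int :=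
  if works = [] then 0
  else
    let S := works.sum
    if 0 < n then
      -- works ≠ [] in this branch, so min?/max? are some; .getD 0 is never taken
      let mn := (PySem.List.min? works (fun x => x)).getD 0
      let mx := (PySem.List.max? works (fun x => x)).getD 0
      let L0 := pvBS (mx - (mn - n)).toNat (mn - n) mx n works
      let r0 := n - pvCost works L0
      let L := if L0 ≤ 0 ∧ 0 ≤ mx then 0 else L0
      let r := if L0 ≤ 0 ∧ 0 ≤ mx then 0 else r0
      let used := pvCost works L + r
      let sq := ((works.filter (fun w => decide (w < L))).map (fun w => w * w)).sum
        + (((works.filter (fun w => decide (L ≤ w))).length : Int) - r) * L * L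
        + r * (L - 1) * (L - 1)
      if 0 ≤ S - used then sq else 0
    else
      let used := (0 : Int)
      let sq := (works.map (fun w => w * w)).sum
      if 0 ≤ S - used then sq else 0

-- ===== PRECONDITION & SPEC =====
-- Pre_ excludes only works = [] with n > 0, where A's heappop raises IndexError.
def Pre_solution (n : Int) (works : List Int) : Prop := works ≠ [] ∨ n ≤ 0
instance (n : Int) (works : List Int) : Decidable (Pre_solution n works) := by
  unfold Pre_solution; infer_instance
def pvWitness_solution : Int × List Int := (4, [4, 3, 3])

def Spec_solution (n : Int) (works : List Int) (out : Int) : Prop := out = solution_alt n works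
instance (n : Int) (works : List Int) (out : Int) : Decidable (Spec_solution n works out) := by
  unfold Spec_solution; infer_instance

-- ===== CLAIM (what is proved, stated in full; the proofs are below) =====
def Claim_equal_solution : Prop := ∀ (n : Int) (works : List Int), Dom_solution n works → Pre_solution n works → Spec_solution n works (solution n works)

-- ===== LEMMAS AND PROOFS =====

-- abstract quantities (proof-side only)
def costN (xs : List Int) (L : Int) : Int := (xs.map (fun x => max (L - x) 0)).sum
def sqA (xs : List Int) (L : Int) : Int := (xs.map (fun x => if L < x then x ^ 2 else 0)).sum
def cntLE (xs : List Int) (L : Int) : Int := ((xs.filter (fun x => decide (x ≤ L))).length : Int)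
def sumsq (xs : List Int) : Int := (xs.map (fun w => w ^ 2)).sum

theorem costN_nonneg (xs : List Int) (L : Int) : 0 ≤ costN xs L := by
  induction xs with
  | nil => simp [costN]
  | cons x t ih =>
    simp only [costN, List.map_cons, List.sum_cons] at *
    have : (0:Int) ≤ max (L - x) 0 := le_max_right _ _
    omega

theorem costN_mono (xs : List Int) {L L' : Int} (h : L ≤ L') : costN xs L ≤ costN xs L' := by
  induction xs with
  | nil => simp [costN]
  | cons x t ih =>
    simp only [costN, List.map_cons, List.sum_cons] at *
    have : max (L - x) 0 ≤ max (L' - x) 0 := by omega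
    omega

theorem costN_eq_zero (xs : List Int) (L : Int) (h : ∀ x ∈ xs, L ≤ x) : costN xs L = 0 := by
  induction xs with
  | nil => simp [costN]
  | cons x t ih =>
    have hx := h x (by simp)
    have ht := ih (fun y hy => h y (by simp [hy]))
    simp only [costN, List.map_cons, List.sum_cons] at *
    have : max (L - x) 0 = 0 := by omega
    omega

-- bridge: costN on the negated list is pvCost on the original
theorem costN_map_neg (ws : List Int) (L : Int) :
    costN (ws.map (fun w => -1 * w)) L = pvCost ws (-L) := by
  induction ws with
  | nil => simp [costN, pvCost]
  | cons w t ih =>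
    simp only [costN, pvCost, List.map_cons, List.sum_cons, List.filter_cons] at *
    by_cases h : -L < w
    · simp only [h, decide_true, if_true, List.map_cons, List.sum_cons]
      have : max (L - -1 * w) 0 = w - -L := by omega
      omega
    · simp only [h, decide_false, Bool.false_eq_true, if_false]
      have : max (L - -1 * w) 0 = 0 := by omega
      omega

theorem sqA_map_neg (ws : List Int) (L : Int) :
    sqA (ws.map (fun w => -1 * w)) L = ((ws.filter (fun w => decide (w < -L))).map (fun w => w * w)).sum := by
  induction ws with
  | nil => simp [sqA]
  | cons w t ih =>
    simp only [sqA, List.map_cons, List.sum_cons, List.filter_cons] at *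
    by_cases h : w < -L
    · have h' : L < -1 * w := by omega
      simp only [h, h', decide_true, if_true, List.map_cons, List.sum_cons, ih]
      ring_nf
    · have h' : ¬ (L < -1 * w) := by omega
      simp only [h, h', decide_false, Bool.false_eq_true, if_false, ih]
      omega

theorem cntLE_map_neg (ws : List Int) (L : Int) :
    cntLE (ws.map (fun w => -1 * w)) L = ((ws.filter (fun w => decide (-L ≤ w))).length : Int) := by
  induction ws with
  | nil => simp [cntLE]
  | cons w t ih =>
    simp only [cntLE, List.map_cons, List.filter_cons] at *
    by_cases h : -L ≤ w
    · have h' : -1 * w ≤ L := by omega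
      simp only [h, h', decide_true, if_true, List.length_cons]
      push_cast
      omega
    · have h' : ¬ (-1 * w ≤ L) := by omega
      simp only [h, h', decide_false, Bool.false_eq_true, if_false, ih]
  

theorem sum_map_neg (ws : List Int) : (ws.map (fun w => -1 * w)).sum = -ws.sum := by
  induction ws with
  | nil => simp
  | cons w t ih => simp only [List.map_cons, List.sum_cons, ih]; ring

theorem sumsq_map_neg (ws : List Int) :
    sumsq (ws.map (fun w => -1 * w)) = (ws.map (fun w => w * w)).sum := by
  induction ws with
  | nil => simp [sumsq]
  | cons w t ih =>
    simp only [sumsq, List.map_cons, List.sum_cons] at *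
    rw [ih]; ring_nf


-- decomposition lemmas for the abstract quantities
theorem costN_append (a b : List Int) (L : Int) : costN (a ++ b) L = costN a L + costN b L := by
  simp [costN]

theorem costN_replicate (k : Nat) (c L : Int) : costN (List.replicate k c) L = k * max (L - c) 0 := by
  induction k with
  | zero => simp [costN]
  | succ k ih =>
    simp only [List.replicate_succ, costN, List.map_cons, List.sum_cons] at *
    rw [ih]; push_cast; ring

theorem costN_perm {l1 l2 : List Int} (h : l1.Perm l2) (L : Int) : costN l1 L = costN l2 L :=
  (h.map _).sum_eq

theorem sqA_append (a b : List Int) (L : Int) : sqA (a ++ b) L = sqA a L + sqA b L := by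
  simp [sqA]

theorem sqA_replicate (k : Nat) (c L : Int) :
    sqA (List.replicate k c) L = k * (if L < c then c ^ 2 else 0) := by
  induction k with
  | zero => simp [sqA]
  | succ k ih =>
    simp only [List.replicate_succ, sqA, List.map_cons, List.sum_cons] at *
    rw [ih]; push_cast; ring

theorem sqA_perm {l1 l2 : List Int} (h : l1.Perm l2) (L : Int) : sqA l1 L = sqA l2 L :=
  (h.map _).sum_eq

theorem cntLE_append (a b : List Int) (L : Int) : cntLE (a ++ b) L = cntLE a L + cntLE b L := by
  simp [cntLE]

theorem cntLE_replicate (k : Nat) (c L : Int) :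
    cntLE (List.replicate k c) L = if c ≤ L then (k : Int) else 0 := by
  induction k with
  | zero => simp [cntLE]
  | succ k ih =>
    simp only [List.replicate_succ, cntLE, List.filter_cons] at *
    by_cases h : c ≤ L
    · simp only [h, decide_true, if_true, List.length_cons] at *
      push_cast at *
      omega
    · simp only [h, decide_false, Bool.false_eq_true, if_false] at *
      exact ih

theorem cntLE_perm {l1 l2 : List Int} (h : l1.Perm l2) (L : Int) : cntLE l1 L = cntLE l2 L := by
  simp [cntLE, (h.filter _).length_eq]

theorem sumsq_append (a b : List Int) : sumsq (a ++ b) = sumsq a + sumsq b := by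
  simp [sumsq]

theorem sumsq_replicate (k : Nat) (c : Int) : sumsq (List.replicate k c) = k * c ^ 2 := by
  induction k with
  | zero => simp [sumsq]
  | succ k ih =>
    simp only [List.replicate_succ, sumsq, List.map_cons, List.sum_cons] at *
    rw [ih]; push_cast; ring

theorem sumsq_perm {l1 l2 : List Int} (h : l1.Perm l2) : sumsq l1 = sumsq l2 :=
  (h.map _).sum_eq

theorem sumI_replicate (k : Nat) (c : Int) : (List.replicate k c).sum = k * c := by
  induction k with
  | zero => simp
  | succ k ih => simp only [List.replicate_succ, List.sum_cons, ih]; push_cast; ring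

theorem cntLE_eq_zero (l : List Int) (L : Int) (h : ∀ x ∈ l, L < x) : cntLE l L = 0 := by
  induction l with
  | nil => simp [cntLE]
  | cons x t ih =>
    have hx := h x (by simp)
    simp only [cntLE, List.filter_cons, show ¬ (x ≤ L) by omega, decide_false,
      Bool.false_eq_true, if_false] at *
    exact ih (fun y hy => h y (by simp [hy]))

theorem sumsq_split (l : List Int) (L : Int) (h : ∀ x ∈ l, L ≤ x) :
    sumsq l = sqA l L + cntLE l L * L ^ 2 := by
  induction l with
  | nil => simp [sumsq, sqA, cntLE]
  | cons x t ih =>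
    have hx := h x (by simp)
    have ht := ih (fun y hy => h y (by simp [hy]))
    simp only [sumsq, sqA, cntLE, List.map_cons, List.sum_cons, List.filter_cons] at *
    by_cases hlt : L < x
    · have : ¬ (x ≤ L) := by omega
      simp only [hlt, if_true, this, decide_false, Bool.false_eq_true, if_false]
      omega
    · have hxL : x = L := by omega
      have : (x ≤ L) := by omega
      simp only [hlt, if_false, this, decide_true, if_true, List.length_cons]
      push_cast
      rw [ht, hxL]; ring

theorem sumsq_eq_sqA_of_gt (l : List Int) (L : Int) (h : ∀ x ∈ l, L < x) :
    sumsq l = sqA l L := by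
  rw [sumsq_split l L (fun x hx => le_of_lt (h x hx)), cntLE_eq_zero l L h]
  ring

-- characterization of the inner pop loop
theorem pvInner_spec (ws : List Int) : ∀ (temp : List Int) (n t0 : Int),
    pvInner ws temp n t0 =
      (temp ++ List.replicate (min ((n - temp.length).toNat) ((ws.takeWhile (fun w => decide (t0 = w))).length)) t0,
       ws.drop (min ((n - temp.length).toNat) ((ws.takeWhile (fun w => decide (t0 = w))).length))) := by
  induction ws with
  | nil => intro temp n t0; simp [pvInner]
  | cons w rest ih =>
    intro temp n t0
    simp only [pvInner]
    by_cases hc : (temp.length : Int) < n ∧ t0 = w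
    · rw [if_pos hc]
      obtain ⟨hlen, ht0⟩ := hc
      subst ht0
      rw [ih]
      have htw : (t0 :: rest).takeWhile (fun w' => decide (t0 = w')) =
          t0 :: rest.takeWhile (fun w' => decide (t0 = w')) := by
        simp
      set b := (rest.takeWhile (fun w' => decide (t0 = w'))).length with hb
      have hlen' : ((temp ++ [t0]).length : Int) = (temp.length : Int) + 1 := by
        simp
      have hmin : min ((n - ((temp.length : Int) + 1)).toNat) b + 1
          = min ((n - (temp.length : Int)).toNat) (b + 1) := by omega
      rw [Prod.mk.injEq]
      refine ⟨?_, ?_⟩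
      · rw [htw, hlen']
        simp only [List.length_cons, ← hb, ← hmin, List.replicate_succ, List.append_assoc,
          List.singleton_append]
      · rw [htw, hlen']
        simp only [List.length_cons, ← hb, ← hmin, List.drop_succ_cons]
  
    · rw [if_neg hc]
      rcases Decidable.not_and_iff_not_or_not.mp hc with h1 | h2
      · have : (n - (temp.length : Int)).toNat = 0 := by omega
        simp [this]
      · have htw : (w :: rest).takeWhile (fun w' => decide (t0 = w')) = [] := by
          simp [List.takeWhile_cons, h2]
        simp [htw]

-- bisection correctness
theorem pvBS_spec : ∀ (fuel : Nat) (lo hi n : Int) (works : List Int),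
    (hi - lo).toNat ≤ fuel → lo ≤ hi → pvCost works hi ≤ n → n < pvCost works (lo - 1) →
    pvCost works (pvBS fuel lo hi n works) ≤ n ∧ n < pvCost works (pvBS fuel lo hi n works - 1) := by
  intro fuel
  induction fuel with
  | zero =>
    intro lo hi n works hf hle hhi hlo
    have : lo = hi := by omega
    subst this
    simpa [pvBS] using ⟨hhi, hlo⟩
  | succ f ih =>
    intro lo hi n works hf hle hhi hlo
    by_cases hlt : lo < hi
    · have hmid : PySem.Int.floordiv (lo + hi) 2 = (lo + hi) / 2 :=
        PySem.Int.floordiv_eq_ediv_of_pos (by norm_num)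
      simp only [pvBS, if_pos hlt, hmid]
      set mid := (lo + hi) / 2 with hm
      have hbounds : lo ≤ mid ∧ mid < hi := by omega
      by_cases hcm : pvCost works mid ≤ n
      · rw [if_pos hcm]
        exact ih lo mid n works (by omega) (by omega) hcm hlo
      · rw [if_neg hcm]
        have : n < pvCost works ((mid + 1) - 1) := by
          simpa using (by omega : n < pvCost works mid)
        exact ih (mid + 1) hi n works (by omega) (by omega) hhi this
    · have : lo = hi := by omega
      subst this
      simpa [pvBS, hlt] using ⟨hhi, hlo⟩

theorem pvCost_eq_zero (works : List Int) (M : Int) (h : ∀ w ∈ works, w ≤ M) :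
    pvCost works M = 0 := by
  induction works with
  | nil => simp [pvCost]
  | cons w t ih =>
    have hw := h w (by simp)
    simp only [pvCost, List.filter_cons, show ¬ (M < w) by omega, decide_false,
      Bool.false_eq_true, if_false] at *
    exact ih (fun y hy => h y (by simp [hy]))

theorem pvCost_lower (works : List Int) (M c : Int) (hc : 1 ≤ c)
    (h : ∀ w ∈ works, M + c ≤ w) : (works.length : Int) * c ≤ pvCost works M := by
  induction works with
  | nil => simp [pvCost]
  | cons w t ih =>
    have hw := h w (by simp)
    have ht := ih (fun y hy => h y (by simp [hy]))
    simp only [pvCost, List.filter_cons, show (M < w) by omega, decide_true, if_true,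
      List.map_cons, List.sum_cons, List.length_cons] at *
    push_cast
    nlinarith

-- in a sorted tail whose elements are ≥ m, the leading run of m's is a replicate
-- and everything after it is > m
theorem run_split (m : Int) : ∀ (l : List Int), l.Pairwise (· ≤ ·) → (∀ x ∈ l, m ≤ x) →
    l.takeWhile (fun w => decide (m = w)) =
      List.replicate (l.takeWhile (fun w => decide (m = w))).length m ∧
    ∀ x ∈ l.dropWhile (fun w => decide (m = w)), m < x := by
  intro l
  induction l with
  | nil => intro _ _; simp
  | cons w t ih =>
    intro hpw hge
    have hw := hge w (by simp)
    have hpw' : t.Pairwise (· ≤ ·) := hpw.of_cons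
    have hwle : ∀ x ∈ t, w ≤ x := (List.pairwise_cons.mp hpw).1
    by_cases hm : m = w
    · subst hm
      obtain ⟨ih1, ih2⟩ := ih hpw' (fun x hx => hge x (by simp [hx]))
      constructor
      · simp only [List.takeWhile_cons, decide_true, if_true, List.length_cons,
          List.replicate_succ, decide_eq_true_eq]
        exact List.cons_eq_cons.mpr ⟨rfl, ih1⟩
      · simpa only [List.dropWhile_cons, decide_true, decide_eq_true_eq, if_pos] using ih2
    · constructor
      · simp [List.takeWhile_cons, hm]
      · simp only [List.dropWhile_cons, hm, decide_false, Bool.false_eq_true, if_false]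
        intro x hx
        rcases List.mem_cons.mp hx with rfl | hx'
        · omega
        · have := hwle x hx'
          omega

-- pvLoop with n = 0 is the identity
theorem pvLoop_zero (f : Nat) (xs : List Int) : pvLoop f 0 xs = xs := by
  cases f <;> simp [pvLoop]

theorem pvLoop_nonpos (f : Nat) (n : Int) (xs : List Int) (h : ¬ 0 < n) :
    pvLoop f n xs = xs := by
  cases f <;> simp [pvLoop, h]

theorem pvLoop_succ (f : Nat) (n : Int) (xs : List Int) (hn : 0 < n) (m : Int) (rest : List Int)
    (h : PySem.List.sorted xs (fun x => x) false = m :: rest) :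
    pvLoop (f+1) n xs = if m = 0 then rest else
      (let tr := pvInner rest [m] n m
       pvLoop f (n - tr.1.length) (tr.2 ++ tr.1.map (fun t => t + 1))) := by
  simp only [pvLoop, if_pos hn, h]


-- clamp condition: the final level is ≥ 0 (in negated terms) and some original work is ≥ 0,
-- in which case A breaks at level 0 with the remaining budget unused
theorem pvLoop_char : ∀ (fuel : Nat) (n : Int) (xs : List Int) (Λ : Int),
    n.toNat ≤ fuel → 0 < n → xs ≠ [] →
    costN xs Λ ≤ n → n < costN xs (Λ + 1) →
    ((pvLoop fuel n xs).sum = xs.sum + (if 0 ≤ Λ ∧ ∃ x ∈ xs, x ≤ 0 then costN xs 0 else n)) ∧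
    (sumsq (pvLoop fuel n xs) =
      if 0 ≤ Λ ∧ ∃ x ∈ xs, x ≤ 0 then sqA xs 0
      else sqA xs Λ + (cntLE xs Λ - (n - costN xs Λ)) * Λ ^ 2
            + (n - costN xs Λ) * (Λ + 1) ^ 2) := by
  intro fuel
  induction fuel with
  | zero =>
    intro n xs Λ hfuel hn
    exact absurd rfl (by omega : ¬ (0 : Int) = 0)
  | succ f ih =>
    intro n xs Λ hfuel hn hne hc1 hc2
    cases h : PySem.List.sorted xs (fun x => x) false with
    | nil =>
      exact absurd ((PySem.List.sorted_eq_nil_iff xs (fun x => x) false).mp h) hne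
    | cons m rest =>
      have hperm : (m :: rest).Perm xs := by
        rw [← h]; exact PySem.List.sorted_perm xs (fun x => x) false
      have hmin : ∀ y ∈ xs, m ≤ y := PySem.List.key_head_sorted_le xs (fun x => x) h
      have hpw : (m :: rest).Pairwise (fun a b => a ≤ b) := by
        rw [← h]; exact PySem.List.sorted_pairwise xs (fun x => x)
      have hmem : m ∈ xs := hperm.subset (by simp)
      rw [pvLoop_succ f n xs hn m rest h]
      by_cases hm0 : m = 0
      · rw [if_pos hm0]
        subst hm0
        have hge0 : ∀ x ∈ xs, 0 ≤ x := hmin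
        have hcost0 : costN xs 0 = 0 := costN_eq_zero xs 0 hge0
        have hΛ : 0 ≤ Λ := by
          by_contra hneg
          have := costN_mono xs (by omega : Λ + 1 ≤ 0)
          omega
        have hex : ∃ x ∈ xs, x ≤ 0 := ⟨0, hmem, le_refl 0⟩
        rw [if_pos ⟨hΛ, hex⟩, if_pos ⟨hΛ, hex⟩]
        have hsum : (0 :: rest).sum = xs.sum := hperm.sum_eq
        have hsq : sumsq (0 :: rest) = sumsq xs := sumsq_perm hperm
        have hsq0 : sumsq xs = sqA xs 0 := by
          rw [sumsq_split xs 0 hge0]; ring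
        constructor
        · simp only [List.sum_cons] at hsum; omega
        · rw [hsq0] at hsq
          have h0 : sumsq (0 :: rest) = 0 ^ 2 + sumsq rest := by simp [sumsq]
          rw [h0] at hsq
          rw [← hsq]
          ring
      · rw [if_neg hm0]
        have hpw' : rest.Pairwise (fun a b => a ≤ b) := hpw.of_cons
        have hge : ∀ x ∈ rest, m ≤ x := (List.pairwise_cons.mp hpw).1
        obtain ⟨htake, hdgt⟩ := run_split m rest hpw' hge
        rw [pvInner_spec]
        simp only [List.length_cons, List.length_nil, Nat.cast_one, Nat.cast_zero, zero_add,
          List.singleton_append, List.map_cons, List.map_replicate, List.length_replicate,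
          Nat.cast_add]
        obtain ⟨kT, hkT⟩ : ∃ k, (rest.takeWhile (fun w => decide (m = w))).length = k :=
          ⟨_, rfl⟩
        obtain ⟨d, hd⟩ : ∃ d', rest.dropWhile (fun w => decide (m = w)) = d' := ⟨_, rfl⟩
        rw [hkT] at htake
        rw [hd] at hdgt
        rw [hkT]
        have hrest : rest = List.replicate kT m ++ d := by
          conv_lhs => rw [← List.takeWhile_append_dropWhile
            (p := fun w => decide (m = w)) (l := rest)]
          rw [htake, hd]
        obtain ⟨q, hqmin⟩ : ∃ q, min (n - 1).toNat kT = q := ⟨_, rfl⟩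
        rw [hqmin]
        have hqle : q ≤ kT := hqmin ▸ min_le_right _ _
        have hqa : q ≤ (n - 1).toNat := hqmin ▸ min_le_left _ _
        have hqeq : q = (n - 1).toNat ∨ q = kT := by
          rcases le_total ((n - 1).toNat) kT with hle | hle
          · exact Or.inl ((min_eq_left hle).symm.trans hqmin).symm
          · exact Or.inr ((min_eq_right hle).symm.trans hqmin).symm
        have hcast : ((kT - q : Nat) : Int) = (kT : Int) - (q : Int) := by omega
        have hdrop : rest.drop q = List.replicate (kT - q) m ++ d := by
          rw [hrest, List.drop_append, List.drop_replicate, List.length_replicate,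
            Nat.sub_eq_zero_of_le hqle, List.drop_zero]
        -- the next multiset, in canonical form
        have hYperm : (rest.drop q ++ ((m + 1) :: List.replicate q (m + 1))).Perm
            (List.replicate (kT - q) m ++ (List.replicate (q + 1) (m + 1) ++ d)) := by
          rw [hdrop, ← List.replicate_succ, List.append_assoc]
          exact List.Perm.append_left _ List.perm_append_comm
        have hxsP : xs.Perm (List.replicate (kT + 1) m ++ d) := by
          refine hperm.symm.trans ?_
          rw [hrest, List.replicate_succ]
          simp
        have hd_ge1 : ∀ x ∈ d, m + 1 ≤ x := fun x hx => by have := hdgt x hx; omega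
        -- decomposed quantities
        have hcostxs : ∀ L, costN xs L = ((kT : Int) + 1) * max (L - m) 0 + costN d L := by
          intro L
          rw [costN_perm hxsP L, costN_append, costN_replicate]
          push_cast; ring
        have hsumxs : xs.sum = ((kT : Int) + 1) * m + d.sum := by
          rw [hxsP.sum_eq, List.sum_append, sumI_replicate]
          push_cast; ring
        have hsumsqxs : sumsq xs = ((kT : Int) + 1) * m ^ 2 + sumsq d := by
          rw [sumsq_perm hxsP, sumsq_append, sumsq_replicate]
          push_cast; ring
        have hsqxs : ∀ L, sqA xs L
            = ((kT : Int) + 1) * (if L < m then m ^ 2 else 0) + sqA d L := by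
          intro L
          rw [sqA_perm hxsP L, sqA_append, sqA_replicate]
          push_cast; ring
        have hcntxs : ∀ L, cntLE xs L
            = ((kT : Int) + 1) * (if m ≤ L then 1 else 0) + cntLE d L := by
          intro L
          rw [cntLE_perm hxsP L, cntLE_append, cntLE_replicate]
          by_cases hL : m ≤ L <;> simp [hL] <;> push_cast <;> ring
        have hcostY : ∀ L, costN (rest.drop q ++ ((m + 1) :: List.replicate q (m + 1))) L
            = ((kT : Int) - q) * max (L - m) 0 + ((q : Int) + 1) * max (L - m - 1) 0
              + costN d L := by
          intro L
          rw [costN_perm hYperm L, costN_append, costN_append, costN_replicate,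
            costN_replicate, hcast]
          push_cast; ring
        have hsumY : (rest.drop q ++ ((m + 1) :: List.replicate q (m + 1))).sum
            = ((kT : Int) - q) * m + ((q : Int) + 1) * (m + 1) + d.sum := by
          rw [hYperm.sum_eq, List.sum_append, List.sum_append, sumI_replicate,
            sumI_replicate, hcast]
          push_cast; ring
        have hsumsqY : sumsq (rest.drop q ++ ((m + 1) :: List.replicate q (m + 1)))
            = ((kT : Int) - q) * m ^ 2 + ((q : Int) + 1) * (m + 1) ^ 2 + sumsq d := by
          rw [sumsq_perm hYperm, sumsq_append, sumsq_append, sumsq_replicate,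
            sumsq_replicate, hcast]
          push_cast; ring
        have hsqY : ∀ L, sqA (rest.drop q ++ ((m + 1) :: List.replicate q (m + 1))) L
            = ((kT : Int) - q) * (if L < m then m ^ 2 else 0)
              + ((q : Int) + 1) * (if L < m + 1 then (m + 1) ^ 2 else 0) + sqA d L := by
          intro L
          rw [sqA_perm hYperm L, sqA_append, sqA_append, sqA_replicate, sqA_replicate, hcast]
          push_cast; ring
        have hcntY : ∀ L, cntLE (rest.drop q ++ ((m + 1) :: List.replicate q (m + 1))) L
            = ((kT : Int) - q) * (if m ≤ L then 1 else 0)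
              + ((q : Int) + 1) * (if m + 1 ≤ L then 1 else 0) + cntLE d L := by
          intro L
          rw [cntLE_perm hYperm L, cntLE_append, cntLE_append, cntLE_replicate,
            cntLE_replicate, hcast]
          by_cases hL1 : m ≤ L <;> by_cases hL2 : m + 1 ≤ L <;>
            simp [hL1, hL2] <;> push_cast <;> ring
        have hexxs : (∃ x ∈ xs, x ≤ 0) ↔ m < 0 := by
          constructor
          · rintro ⟨x, hx, hx0⟩
            have := hmin x hx
            omega
          · intro hm
            exact ⟨m, hmem, by omega⟩
        have hexY : (∃ x ∈ rest.drop q ++ ((m + 1) :: List.replicate q (m + 1)), x ≤ 0)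
            ↔ m < 0 := by
          constructor
          · rintro ⟨x, hx, hx0⟩
            have hx' := hYperm.subset hx
            rcases List.mem_append.mp hx' with hx1 | hx2
            · have := List.eq_of_mem_replicate hx1; omega
            · rcases List.mem_append.mp hx2 with hx3 | hx4
              · have := List.eq_of_mem_replicate hx3; omega
              · have := hdgt x hx4; omega
          · intro hm
            refine ⟨m + 1, hYperm.symm.subset ?_, by omega⟩
            exact List.mem_append.mpr (Or.inr (List.mem_append.mpr
              (Or.inl (List.mem_replicate.mpr ⟨by omega, rfl⟩))))
        have hcostd1 : costN d (m + 1) = 0 := costN_eq_zero d (m + 1) hd_ge1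
        have hckT : costN xs (m + 1) = (kT : Int) + 1 := by
          rw [hcostxs, hcostd1, show max ((m : Int) + 1 - m) 0 = 1 by omega]
          ring
        by_cases hcase : (q : Int) + 1 < n
        · -- whole run moved one level up, budget left: recurse
          have hqkT : q = kT := by
            rcases hqeq with hcq | hcq
            · subst hcq
              exfalso
              omega
            · exact hcq
          have hΛm : m + 1 ≤ Λ := by
            by_contra hcon
            have := costN_mono xs (show Λ + 1 ≤ m + 1 by omega)
            omega
          have hYne : rest.drop q ++ ((m + 1) :: List.replicate q (m + 1)) ≠ [] := by
            intro hcon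
            have := congrArg List.length hcon
            simp at this
          have hcostYΛ : ∀ L, m + 1 ≤ L →
              costN (rest.drop q ++ ((m + 1) :: List.replicate q (m + 1))) L
                = costN xs L - ((kT : Int) + 1) := by
            intro L hL
            rw [hcostY, hcostxs, hqkT, show max (L - m) 0 = L - m by omega,
              show max (L - m - 1) 0 = L - m - 1 by omega]
            ring
          obtain ⟨ihsum, ihsq⟩ := ih (n - ((q : Int) + 1))
            (rest.drop q ++ ((m + 1) :: List.replicate q (m + 1))) Λ
            (by clear hexxs hexY; omega) (by clear hexxs hexY; omega) hYne
            (by rw [hcostYΛ Λ hΛm]; omega)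
            (by rw [hcostYΛ (Λ + 1) (by omega)]; omega)
          constructor
          · rw [ihsum]
            by_cases hcl : 0 ≤ Λ ∧ m < 0
            · rw [if_pos ⟨hcl.1, hexY.mpr hcl.2⟩, if_pos ⟨hcl.1, hexxs.mpr hcl.2⟩]
              rw [hcostYΛ 0 (by omega), hsumY, hsumxs, hqkT]
              ring
            · have hcl1 : ¬ (0 ≤ Λ ∧ ∃ x ∈ rest.drop q ++ ((m + 1) ::
                  List.replicate q (m + 1)), x ≤ 0) := by
                rw [hexY]; exact hcl
              have hcl2 : ¬ (0 ≤ Λ ∧ ∃ x ∈ xs, x ≤ 0) := by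
                rw [hexxs]; exact hcl
              rw [if_neg hcl1, if_neg hcl2, hsumY, hsumxs, hqkT]
              ring
          · rw [ihsq]
            by_cases hcl : 0 ≤ Λ ∧ m < 0
            · rw [if_pos ⟨hcl.1, hexY.mpr hcl.2⟩, if_pos ⟨hcl.1, hexxs.mpr hcl.2⟩]
              rw [hsqY, hsqxs, if_neg (show ¬ ((0 : Int) < m) by omega),
                if_neg (show ¬ ((0 : Int) < m + 1) by omega)]
              ring
            · have hcl1 : ¬ (0 ≤ Λ ∧ ∃ x ∈ rest.drop q ++ ((m + 1) ::
                  List.replicate q (m + 1)), x ≤ 0) := by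
                rw [hexY]; exact hcl
              have hcl2 : ¬ (0 ≤ Λ ∧ ∃ x ∈ xs, x ≤ 0) := by
                rw [hexxs]; exact hcl
              rw [if_neg hcl1, if_neg hcl2]
              have e1 : sqA (rest.drop q ++ ((m + 1) :: List.replicate q (m + 1))) Λ
                  = sqA xs Λ := by
                rw [hsqY, hsqxs, if_neg (show ¬ (Λ < m) by omega),
                  if_neg (show ¬ (Λ < m + 1) by omega)]
                ring
              have e2 : cntLE (rest.drop q ++ ((m + 1) :: List.replicate q (m + 1))) Λ
                  = cntLE xs Λ := by
                rw [hcntY, hcntxs, if_pos (show (m : Int) ≤ Λ by omega), if_pos hΛm,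
                  hqkT]
                push_cast
                ring
              have e3 : costN (rest.drop q ++ ((m + 1) :: List.replicate q (m + 1))) Λ
                  = costN xs Λ - ((kT : Int) + 1) := hcostYΛ Λ hΛm
              rw [e1, e2, e3, hqkT]
              ring
        · -- budget exhausted in this round: the loop stops after this iteration
          have hqn : (q : Int) + 1 = n := by clear hexxs hexY; omega
          have hstop : n - ((q : Int) + 1) = 0 := by clear hexxs hexY; omega
          rw [hstop, pvLoop_zero]
          by_cases hk : n ≤ (kT : Int)
          · -- strictly more copies of the minimum than budget: Λ = m
            have hΛm : Λ = m := by
              have h1 : Λ ≤ m := by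
                by_contra hcon
                have := costN_mono xs (show m + 1 ≤ Λ by omega)
                omega
              have h2 : costN xs (Λ + 1) ≤ costN xs (m + 1) :=
                costN_mono xs (by omega)
              by_contra hcon
              have h3 : costN xs (Λ + 1) = 0 :=
                costN_eq_zero xs (Λ + 1) (fun x hx => by have := hmin x hx; omega)
              omega
            have hcΛ : costN xs Λ = 0 :=
              costN_eq_zero xs Λ (fun x hx => by have := hmin x hx; omega)
            have hncl : ¬ (0 ≤ Λ ∧ ∃ x ∈ xs, x ≤ 0) := by
              rintro ⟨h0, hex⟩
              rw [hexxs] at hex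
              omega
            rw [if_neg hncl, if_neg hncl]
            constructor
            · rw [hsumY, hsumxs]
              linear_combination hqn
            · rw [hΛm] at hcΛ
              rw [hsumsqY, hΛm, hcΛ, hsqxs, hcntxs, if_neg (show ¬ (m < m) by omega),
                if_pos (le_refl m),
                show sqA d m = sumsq d from (sumsq_eq_sqA_of_gt d m hdgt).symm,
                cntLE_eq_zero d m hdgt]
              linear_combination ((m + 1) ^ 2 - m ^ 2) * hqn
          · -- the whole run fits exactly: Λ = m + 1, no budget left
            have hqkT : q = kT := by
              rcases hqeq with hcq | hcq
              · subst hcq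
                omega
              · exact hcq
            have hn_eq : (kT : Int) + 1 = n := by omega
            have hce : costN xs (m + 1) = n := by omega
            have hΛ1 : Λ = m + 1 := by
              have hlow : m + 1 ≤ Λ := by
                by_contra hcon
                have := costN_mono xs (show Λ + 1 ≤ m + 1 by omega)
                omega
              by_contra hcon
              have h2 : (2 : Int) ≤ max (Λ - m) 0 := by omega
              have h3 := costN_nonneg d Λ
              have h4 := hcostxs Λ
              nlinarith
            have hsplitd : sumsq d = sqA d (m + 1) + cntLE d (m + 1) * (m + 1) ^ 2 :=
              sumsq_split d (m + 1) hd_ge1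
            by_cases hcl : 0 ≤ Λ ∧ ∃ x ∈ xs, x ≤ 0
            · -- here m = -1 and the two branch values coincide
              have hm1 : m = -1 := by
                have := hexxs.mp hcl.2
                omega
              rw [if_pos hcl, if_pos hcl]
              constructor
              · rw [hsumY, hsumxs, hcostxs 0, hqkT,
                  show max ((0 : Int) - m) 0 = 1 from by rw [hm1]; decide,
                  costN_eq_zero d 0 (fun x hx => by have := hd_ge1 x hx; omega)]
                ring
              · rw [hsumsqY, hsqxs 0, hqkT, hm1]
                rw [show sumsq d = sqA d 0 + cntLE d 0 * (0 : Int) ^ 2 from by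
                  have := sumsq_split d 0 (fun x hx => by have := hd_ge1 x hx; omega)
                  simpa using this]
                norm_num
            · rw [if_neg hcl, if_neg hcl]
              constructor
              · rw [hsumY, hsumxs]
                linear_combination hqn
              · rw [hsumsqY, hΛ1, hce, hsqxs, hcntxs,
                  if_neg (show ¬ (m + 1 < m) by omega),
                  if_pos (show m ≤ m + 1 by omega), hsplitd, hqkT]
                ring

-- bridges from the negated A-side quantities to B's filtered sums
theorem sumsq_goal_eq (l : List Int) : (List.map (fun w => w ^ 2) l).sum = sumsq l := rfl

-- ===== VERDICT (by name: the statement is the Claim_ definition above) =====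
theorem solution_spec : Claim_equal_solution := by
  unfold Claim_equal_solution
  intro n works _ hpre
  unfold Spec_solution solution solution_alt
  dsimp only
  by_cases hw : works = []
  · subst hw
    have hn : n ≤ 0 := by
      rcases hpre with h | h
      · exact absurd rfl h
      · exact h
    have h0 : n.toNat = 0 := by omega
    simp [h0, pvLoop]
  · rw [if_neg hw]
    by_cases hn : 0 < n
    · rw [if_pos hn]
      -- extract min and max
      obtain ⟨mnv, hmn⟩ : ∃ v, PySem.List.min? works (fun x => x) = some v := by
        cases hm : PySem.List.min? works (fun x => x) with
        | none => exact absurd ((PySem.List.min?_eq_none_iff works (fun x => x)).mp hm) hw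
        | some v => exact ⟨v, rfl⟩
      obtain ⟨mxv, hmx⟩ : ∃ v, PySem.List.max? works (fun x => x) = some v := by
        cases hm : PySem.List.max? works (fun x => x) with
        | none => exact absurd ((PySem.List.max?_eq_none_iff works (fun x => x)).mp hm) hw
        | some v => exact ⟨v, rfl⟩
      rw [hmn, hmx]
      simp only [Option.getD_some]
      have hmnmem : mnv ∈ works := PySem.List.min?_mem hmn
      have hmxmem : mxv ∈ works := PySem.List.max?_mem hmx
      have hmnmin : ∀ y ∈ works, mnv ≤ y := PySem.List.min?_isMin hmn
      have hmxmax : ∀ y ∈ works, y ≤ mxv := PySem.List.max?_isMax hmx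
      have hub : pvCost works mxv = 0 := pvCost_eq_zero works mxv hmxmax
      have hlen1 : (1 : Int) ≤ (works.length : Int) := by
        have := List.length_pos_iff.mpr hw
        omega
      have hlb : n < pvCost works (mnv - n - 1) := by
        have hlow := pvCost_lower works (mnv - n - 1) (n + 1) (by omega)
          (fun w hw' => by have := hmnmin w hw'; omega)
        nlinarith
      obtain ⟨hBS1, hBS2⟩ := pvBS_spec ((mxv - (mnv - n)).toNat) (mnv - n) mxv n works
        (le_refl _) (by have := hmnmin mxv hmxmem; omega) (by omega)
        (by have : mnv - n - 1 = mnv - n - 1 := rfl; omega)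
      set L0 := pvBS ((mxv - (mnv - n)).toNat) (mnv - n) mxv n works with hL0
      -- A-side characterization with Λ = -L0
      have hxs_ne : works.map (fun w => -1 * w) ≠ [] := by simpa using hw
      have hb1 : costN (works.map (fun w => -1 * w)) (-L0) = pvCost works L0 := by
        rw [costN_map_neg, neg_neg]
      have hb2 : costN (works.map (fun w => -1 * w)) (-L0 + 1) = pvCost works (L0 - 1) := by
        rw [costN_map_neg, show -(-L0 + 1) = L0 - 1 by ring]
      obtain ⟨hAsum, hAsq⟩ := pvLoop_char n.toNat n (works.map (fun w => -1 * w)) (-L0)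
        (le_refl _) hn hxs_ne (by rw [hb1]; exact hBS1) (by rw [hb2]; exact hBS2)
      have hex_iff : (∃ x ∈ works.map (fun w => -1 * w), x ≤ 0) ↔ 0 ≤ mxv := by
        constructor
        · rintro ⟨x, hx, hx0⟩
          obtain ⟨w, hwmem, rfl⟩ := List.mem_map.mp hx
          have := hmxmax w hwmem
          omega
        · intro hx
          exact ⟨-1 * mxv, List.mem_map.mpr ⟨mxv, hmxmem, rfl⟩, by omega⟩
      have hsum_neg := sum_map_neg works
      rw [sumsq_goal_eq, hAsum, hAsq]
      by_cases hcl : L0 ≤ 0 ∧ 0 ≤ mxv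
      · have hcl' : 0 ≤ -L0 ∧ ∃ x ∈ works.map (fun w => -1 * w), x ≤ 0 :=
          ⟨by omega, hex_iff.mpr hcl.2⟩
        rw [if_pos hcl', if_pos hcl', if_pos hcl, if_pos hcl]
        have hc0 : costN (works.map (fun w => -1 * w)) 0 = pvCost works 0 := by
          simpa using costN_map_neg works 0
        have hsq0 : sqA (works.map (fun w => -1 * w)) 0
            = ((works.filter (fun w => decide (w < 0))).map (fun w => w * w)).sum := by
          simpa using sqA_map_neg works 0
        rw [hc0, hsq0, hsum_neg]
        clear hAsum hAsq hex_iff hcl'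
        split_ifs with h1 h2 h3
        · push_cast
          ring
        · exfalso
          omega
        · exfalso
          omega
        · rfl
      · have hcl' : ¬ (0 ≤ -L0 ∧ ∃ x ∈ works.map (fun w => -1 * w), x ≤ 0) := by
          rw [hex_iff]
          intro hcon
          exact hcl ⟨by omega, hcon.2⟩
        rw [if_neg hcl', if_neg hcl', if_neg hcl, if_neg hcl]
        have hsqL : sqA (works.map (fun w => -1 * w)) (-L0)
            = ((works.filter (fun w => decide (w < L0))).map (fun w => w * w)).sum := by
          rw [sqA_map_neg, neg_neg]
        have hcntL : cntLE (works.map (fun w => -1 * w)) (-L0)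
            = ((works.filter (fun w => decide (L0 ≤ w))).length : Int) := by
          rw [cntLE_map_neg, neg_neg]
        rw [hsqL, hcntL, hb1, hsum_neg]
        clear hAsum hAsq hex_iff hcl'
        split_ifs with h1 h2 h3
        · push_cast
          ring
        · exfalso
          omega
        · exfalso
          omega
        · rfl
    · rw [if_neg hn]
      rw [pvLoop_nonpos n.toNat n _ hn]
      have h2 := sumsq_map_neg works
      rw [sumsq_goal_eq, h2, sum_map_neg]
      split_ifs with h1 h2'
      · rfl
      · exfalso
        omega
      · exfalso
        omega
      · rfl
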